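-- pv_equiv track=rewrite | github.com/iosandroid/algo | lopez/entropy_features.py | lempelZiv_lib
-- ===== SOURCE A (Python) =====
-- def lempelZiv_lib(msg):
--
-- 	try:
-- 		xrange
-- 	except NameError:
-- 		xrange = range
--
-- 	i, lib = 1, [msg[0]]
-- 	while i < len(msg):
--
-- 		for j in xrange(i, len(msg)):
-- 			msg_ = msg[i:j+1]
-- 			if msg_ not in lib:
-- 				lib.append(msg_)
-- 				break
--
-- 		i = j + 1
--
-- 	return lib
-- ===== SOURCE B (Python) =====
-- def lempelZiv_lib(msg):
--     seen = set()
--     lib = []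
--     cur = ""
--     for c in msg:
--         cur += c
--         if cur not in seen:
--             seen.add(cur)
--             lib.append(cur)
--             cur = ""
--     return lib
-- ===== Notes on version B (the rewrite author's own statement) =====
-- stated objective: faster
-- what changed: Replaced A's while-loop with a nested re-slicing scan (each phrase re-built by slicing msg[i:j+1] and membership-tested by scanning the whole lib list) by a single left-to-right pass that grows the current phrase one character at a time and tests membership in a hash set, emitting and resetting when the phrase is new.
-- crash fix: On the empty string A raises IndexError (msg[0]); B returns []. — e.g. on lempelZiv_lib(""): A raises IndexError, B returns []
import Mathlib
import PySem

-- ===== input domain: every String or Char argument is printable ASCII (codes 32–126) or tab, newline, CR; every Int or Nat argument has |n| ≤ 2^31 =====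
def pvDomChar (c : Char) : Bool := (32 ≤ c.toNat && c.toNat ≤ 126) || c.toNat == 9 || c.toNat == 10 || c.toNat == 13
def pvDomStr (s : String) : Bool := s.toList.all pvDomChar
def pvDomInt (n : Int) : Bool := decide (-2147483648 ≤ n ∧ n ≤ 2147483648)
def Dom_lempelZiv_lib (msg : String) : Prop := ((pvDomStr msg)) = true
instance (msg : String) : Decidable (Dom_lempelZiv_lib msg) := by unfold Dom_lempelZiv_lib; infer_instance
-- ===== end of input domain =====

-- B replaces A's nested re-slicing scans by one pass with a growing phrase buffer and a set (faster; measured).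


-- ===== PORT A =====
-- inner 'for j in xrange(i, len(msg))' loop (msg_ = msg[i:j+1] inlined): returns (lib, i) after the
-- for plus 'i = j + 1' (on break at j it is (lib ++ [msg_], j+1); when the for exhausts, final i = len(msg) = j here)
def lzInner (L : List Char) (lib : List String) (i j : Nat) : List String × Nat :=
  if h : j < L.length then
    if String.ofList (PySem.List.slice L (some (i : Int)) (some ((j : Int) + 1))) ∈ lib then
      lzInner L lib i (j + 1)
    else (lib ++ [String.ofList (PySem.List.slice L (some (i : Int)) (some ((j : Int) + 1)))], j + 1)
  else (lib, j)
termination_by L.length - j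

-- cited by lzOuter's decreasing_by (termination of the while loop: i strictly increases)
theorem lzInner_snd_ge (L : List Char) (lib : List String) (i j : Nat) :
    j ≤ (lzInner L lib i j).2 := by
  rw [lzInner]
  split
  next h =>
    split
    next => have := lzInner_snd_ge L lib i (j + 1); omega
    next => simp
  next => simp
termination_by L.length - j
decreasing_by omega

theorem lzInner_snd_gt (L : List Char) (lib : List String) (i j : Nat) (h : j < L.length) :
    j < (lzInner L lib i j).2 := by
  rw [lzInner]; simp only [h, dif_pos]
  split
  · have := lzInner_snd_ge L lib i (j + 1); omega
  · simp

-- the 'while i < len(msg)' loop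
def lzOuter (L : List Char) (lib : List String) (i : Nat) : List String :=
  if h : i < L.length then
    let r := lzInner L lib i i
    lzOuter L r.1 r.2
  else lib
termination_by L.length - i
decreasing_by have := lzInner_snd_gt L lib i i h; omega

def lempelZiv_lib (msg : String) : List String :=
  match PySem.Str.pyGet? msg 0 with
  | none => []                      -- msg[0] raises IndexError on "": outside Pre_
  | some c => lzOuter msg.toList [String.ofList [c]] 1

-- ===== PORT B =====
-- one step of B's for-loop; state = (seen set, lib, current phrase, kept as chars per the PySem string convention)
def lzStep (st : PySem.Set String × List String × List Char) (c : Char) :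
    PySem.Set String × List String × List Char :=
  let cur := st.2.2 ++ [c]
  let s := String.ofList cur
  if PySem.Set.contains st.1 s then (st.1, st.2.1, cur)
  else (PySem.Set.add st.1 s, st.2.1 ++ [s], ([] : List Char))

def lempelZiv_lib_alt (msg : String) : List String :=
  (msg.toList.foldl lzStep (PySem.Set.empty, [], [])).2.1

-- ===== PRECONDITION & SPEC =====
-- Pre_ excludes only the empty string, on which A raises IndexError (msg[0]).
def Pre_lempelZiv_lib (msg : String) : Prop := msg ≠ ""
instance (msg : String) : Decidable (Pre_lempelZiv_lib msg) := by unfold Pre_lempelZiv_lib; infer_instance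
def pvWitness_lempelZiv_lib : String := "abab"

-- On the empty string A raises IndexError (msg[0]); B returns [].
def Raises_lempelZiv_lib (msg : String) : Prop := msg = ""
instance (msg : String) : Decidable (Raises_lempelZiv_lib msg) := by unfold Raises_lempelZiv_lib; infer_instance
def pvRaiseWitness_lempelZiv_lib : String := ""
def pvRaiseWitnessOut_lempelZiv_lib : List String := []

def Spec_lempelZiv_lib (msg : String) (out : List String) : Prop := out = lempelZiv_lib_alt msg
instance (msg : String) (out : List String) : Decidable (Spec_lempelZiv_lib msg out) := by unfold Spec_lempelZiv_lib; infer_instance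

-- ===== CLAIM (what is proved, stated in full; the proofs are below) =====
def Claim_equal_lempelZiv_lib : Prop := ∀ (msg : String), Dom_lempelZiv_lib msg → Pre_lempelZiv_lib msg → Spec_lempelZiv_lib msg (lempelZiv_lib msg)
def Claim_raises_lempelZiv_lib : Prop := (∀ (msg : String), Dom_lempelZiv_lib msg → Raises_lempelZiv_lib msg → ¬ Pre_lempelZiv_lib msg) ∧ (Dom_lempelZiv_lib (pvRaiseWitness_lempelZiv_lib) ∧ Raises_lempelZiv_lib (pvRaiseWitness_lempelZiv_lib) ∧ lempelZiv_lib_alt (pvRaiseWitness_lempelZiv_lib) = pvRaiseWitnessOut_lempelZiv_lib)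

-- ===== LEMMAS AND PROOFS =====

-- unfolding the while loop once (trivially true also when i ≥ len)
theorem lzOuter_unfold (L : List Char) (lib : List String) (j : Nat) :
    lzOuter L lib j = lzOuter L (lzInner L lib j j).1 (lzInner L lib j j).2 := by
  by_cases h : j < L.length
  · conv_lhs => rw [lzOuter]
    simp [h]
  · have h1 : lzInner L lib j j = (lib, j) := by rw [lzInner]; simp [h]
    rw [h1]

-- B's pass from position j, phrase started at i, in lockstep with A's inner scan + the rest of the while loop
theorem lz_main (L : List Char) :
    ∀ (m j i : Nat) (lib : List String) (seen : PySem.Set String),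
      L.length - j ≤ m → i ≤ j →
      (∀ s : String, s ∈ seen ↔ s ∈ lib) →
      (List.foldl lzStep (seen, lib, (L.drop i).take (j - i)) (L.drop j)).2.1
        = lzOuter L (lzInner L lib i j).1 (lzInner L lib i j).2 := by
  intro m
  induction m with
  | zero =>
    intro j i lib seen hm _ _
    have hj : ¬ j < L.length := by omega
    rw [lzInner]; simp only [hj]
    rw [show List.drop j L = [] from List.drop_eq_nil_of_le (by omega)]
    simp only [List.foldl_nil]
    rw [lzOuter]; simp [hj]
  | succ m ih =>
    intro j i lib seen hm hij hmem
    by_cases hj : j < L.length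
    · rw [List.drop_eq_getElem_cons hj, List.foldl_cons]
      have hji : j - i < (L.drop i).length := by simp; omega
      have hcur : (L.drop i).take (j - i) ++ [L[j]] = (L.drop i).take (j + 1 - i) := by
        have hg : (L.drop i)[j - i]'hji = L[j] := by
          rw [List.getElem_drop]; congr 1; omega
        rw [← hg, ← List.concat_eq_append, List.take_concat_get]
        congr 1; omega
      have hslice : PySem.List.slice L (some (i : Int)) (some ((j : Int) + 1))
          = (L.drop i).take (j + 1 - i) := by
        have hc : ((j : Int) + 1) = ((j + 1 : Nat) : Int) := by push_cast; ring
        rw [hc, PySem.List.slice_natCast]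
      rw [lzInner]; simp only [hj, dif_pos, hslice]
      set s := String.ofList ((L.drop i).take (j + 1 - i)) with hs
      have hstep : lzStep (seen, lib, (L.drop i).take (j - i)) L[j]
          = if PySem.Set.contains seen s then (seen, lib, (L.drop i).take (j + 1 - i))
            else (PySem.Set.add seen s, lib ++ [s], ([] : List Char)) := by
        simp only [lzStep, hcur, hs]
      have hcontains : PySem.Set.contains seen s = true ↔ s ∈ lib := by
        rw [show PySem.Set.contains seen s = List.contains seen s from rfl,
          List.contains_iff_mem]
        exact hmem s
      by_cases hin : s ∈ lib
      · rw [hstep, if_pos (hcontains.mpr hin), if_pos hin]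
        exact ih (j + 1) i lib seen (by omega) (by omega) hmem
      · have hnc : ¬ (PySem.Set.contains seen s = true) := by rw [hcontains]; exact hin
        rw [hstep, if_neg hnc, if_neg hin]
        have hmem' : ∀ t : String, t ∈ PySem.Set.add seen s ↔ t ∈ lib ++ [s] := by
          intro t
          rw [PySem.Set.mem_add]
          simp [hmem t]
        have := ih (j + 1) (j + 1) (lib ++ [s]) (PySem.Set.add seen s) (by omega)
          (le_refl _) hmem'
        simp only [Nat.sub_self, List.take_zero] at this
        rw [this, ← lzOuter_unfold]
    · rw [lzInner]; simp only [hj]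
      rw [show List.drop j L = [] from List.drop_eq_nil_of_le (by omega)]
      simp only [List.foldl_nil]
      rw [lzOuter]; simp [hj]

-- ===== VERDICT (by name: the statement is the Claim_ definition above) =====
theorem lempelZiv_lib_spec : Claim_equal_lempelZiv_lib := by
  intro msg _ hpre
  unfold Spec_lempelZiv_lib
  have hL : msg.toList ≠ [] := by
    intro h
    exact hpre (String.toList_inj.mp (by simp [h]))
  obtain ⟨c, rest, hcl⟩ : ∃ c rest, msg.toList = c :: rest := by
    cases h : msg.toList with
    | nil => exact absurd h hL
    | cons c rest => exact ⟨c, rest, rfl⟩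
  have hget : PySem.Str.pyGet? msg 0 = some c := by
    simp [PySem.Str.pyGet?, hcl, PySem.List.pyGet?, PySem.List.pyIdx?]
  unfold lempelZiv_lib lempelZiv_lib_alt
  rw [hget, hcl]
  set s0 := String.ofList [c] with hs0
  have hfirst : lzStep (PySem.Set.empty, [], []) c = ([s0], [s0], ([] : List Char)) := by
    simp [lzStep, PySem.Set.empty, PySem.Set.add, PySem.Set.contains, hs0]
  rw [List.foldl_cons, hfirst]
  have hmem : ∀ t : String, t ∈ ([s0] : PySem.Set String) ↔ t ∈ ([s0] : List String) :=
    fun _ => Iff.rfl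
  have hmain := lz_main (c :: rest) (c :: rest).length 1 1 [s0] [s0] (by omega) (le_refl _) hmem
  simp only [Nat.sub_self, List.take_zero, List.drop_one, List.tail_cons] at hmain
  rw [hmain, ← lzOuter_unfold]

def lempelZiv_lib_raises : Claim_raises_lempelZiv_lib := by
  unfold Claim_raises_lempelZiv_lib
  constructor
  · intro msg _ hr
    unfold Pre_lempelZiv_lib
    simp only [Raises_lempelZiv_lib] at hr
    simp [hr]
  · exact ⟨by decide, by decide, by decide⟩
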